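-- pv_equiv track=rewrite | github.com/sungminoh/algorithms | leetcode/solved/1004_Least_Operators_to_Express_Number/solution.py | leastOpsExpressTarget
-- ===== SOURCE A (Python) =====
-- def leastOpsExpressTarget(x: int, target: int) -> int:
--     """Apr 28, 2024 16:34"""
--     positive = negative = 0
--     p = 0
--     while target:
--         target, remain = divmod(target, x)
--         if p > 0:
--             positive, negative = min(
--                 positive + remain * p,
--                 negative + (remain+1) * p,
--             ), min(
--                 positive + (x-remain) * p,
--                 negative + (x-1-remain) * p,
--             )
--         else:
--             positive, negative = remain * 2, (x-remain) * 2
--         p += 1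
--     return min(positive, p+negative)-1
-- ===== SOURCE B (Python) =====
-- def leastOpsExpressTarget(x: int, target: int) -> int:
--     # Two phases: extract the base-x digit chain, then a top-down recursion
--     # over the digits computing the (exact, overshoot) cost pair.
--     digits = []
--     t = target
--     while t:
--         t, r = divmod(t, x)
--         digits.append(r)
--
--     def cost(i):
--         # (E, O): cost of the value made of digits[i:] at power i, and of that value + 1
--         if i == len(digits):
--             return (0, i)
--         e1, o1 = cost(i + 1)
--         w = 2 if i == 0 else i
--         d = digits[i]
--         return (min(d * w + e1, (x - d) * w + o1),
--                 min((d + 1) * w + e1, (x - 1 - d) * w + o1))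
--
--     return cost(0)[0] - 1
-- ===== Notes on version B (the rewrite author's own statement) =====
-- stated objective: alternative
-- what changed: A's forward accumulator loop carrying the (positive, negative) cost pair is replaced by a two-phase decomposition: extract the base-x digit chain, then a top-down structural recursion over the digits returning the (exact, overshoot) cost pair for each suffix.
import Mathlib
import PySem

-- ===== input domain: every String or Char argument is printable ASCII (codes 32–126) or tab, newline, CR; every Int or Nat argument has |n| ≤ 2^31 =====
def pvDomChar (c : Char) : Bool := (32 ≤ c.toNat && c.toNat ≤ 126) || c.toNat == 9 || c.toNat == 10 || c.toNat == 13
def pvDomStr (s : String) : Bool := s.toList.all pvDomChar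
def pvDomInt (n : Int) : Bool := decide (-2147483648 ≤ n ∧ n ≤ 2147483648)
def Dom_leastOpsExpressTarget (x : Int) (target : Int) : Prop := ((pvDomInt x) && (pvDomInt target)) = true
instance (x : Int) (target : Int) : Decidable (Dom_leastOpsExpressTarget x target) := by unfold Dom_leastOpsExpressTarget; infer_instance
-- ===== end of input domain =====

-- B replaces A's forward two-state accumulator loop by digit extraction plus a
-- top-down recursion over the digits (same asymptotic cost; objective: alternative).

-- ===== PORT A =====
-- the while loop of A; fuel only makes the recursion total (Pre_ guarantees enough fuel)
def aGo (x : Int) : Nat → Int → Int → Int → Int → Int × Int × Int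
  | 0, _, positive, negative, p => (positive, negative, p)
  | fuel+1, target, positive, negative, p =>
    if target = 0 then (positive, negative, p)
    else
      let q := PySem.Int.floordiv target x
      let remain := PySem.Int.mod target x
      if p > 0 then
        aGo x fuel q
          (min (positive + remain * p) (negative + (remain + 1) * p))
          (min (positive + (x - remain) * p) (negative + (x - 1 - remain) * p))
          (p + 1)
      else
        aGo x fuel q (remain * 2) ((x - remain) * 2) (p + 1)

def leastOpsExpressTarget (x : Int) (target : Int) : Int :=
  let res := aGo x (2 * target.natAbs + 2) target 0 0 0
  min res.1 (res.2.2 + res.2.1) - 1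

-- ===== PORT B =====
-- phase 1 of Source B: extract the base-x digits (fuel as above)
def bDigits (x : Int) : Nat → Int → List Int
  | 0, _ => []
  | fuel+1, t =>
    if t = 0 then []
    else PySem.Int.mod t x :: bDigits x fuel (PySem.Int.floordiv t x)

-- phase 2 of Source B: cost i = (E, O) for the digit suffix starting at power p
def bCost (x : Int) : List Int → Int → Int × Int
  | [], p => (0, p)
  | d :: rest, p =>
    let eo := bCost x rest (p + 1)
    let w : Int := if p = 0 then 2 else p
    (min (d * w + eo.1) ((x - d) * w + eo.2),
     min ((d + 1) * w + eo.1) ((x - 1 - d) * w + eo.2))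

def leastOpsExpressTarget_alt (x : Int) (target : Int) : Int :=
  (bCost x (bDigits x (2 * target.natAbs + 2) target) 0).1 - 1

-- ===== PRECONDITION & SPEC =====
-- Pre_ admits exactly the inputs on which Python A returns: elsewhere A loops
-- forever (x ∈ {-1,1} with target ≠ 0, or 2 ≤ x with target < 0) or raises
-- ZeroDivisionError (x = 0 with target ≠ 0).
def Pre_leastOpsExpressTarget (x : Int) (target : Int) : Prop :=
  target = 0 ∨ (2 ≤ x ∧ 0 < target) ∨ x ≤ -2
instance (x : Int) (target : Int) : Decidable (Pre_leastOpsExpressTarget x target) := by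
  unfold Pre_leastOpsExpressTarget; infer_instance

def pvWitness_leastOpsExpressTarget : Int × Int := (3, 19)

def Spec_leastOpsExpressTarget (x : Int) (target : Int) (out : Int) : Prop := out = leastOpsExpressTarget_alt x target
instance (x : Int) (target : Int) (out : Int) : Decidable (Spec_leastOpsExpressTarget x target out) := by unfold Spec_leastOpsExpressTarget; infer_instance

-- ===== CLAIM (what is proved, stated in full; the proofs are below) =====
def Claim_equal_leastOpsExpressTarget : Prop := ∀ (x : Int) (target : Int), Dom_leastOpsExpressTarget x target → Pre_leastOpsExpressTarget x target → Spec_leastOpsExpressTarget x target (leastOpsExpressTarget x target)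

-- ===== LEMMAS AND PROOFS =====

-- termination measure of the quotient chain t ↦ t // x
def pvMu (t : Int) : Nat := 2 * t.natAbs + (if 0 < t then 1 else 0)

lemma pvMu_step (x t : Int) (hx : 2 ≤ x ∨ x ≤ -2) (hpos : 2 ≤ x → 0 ≤ t)
    (ht : t ≠ 0) :
    pvMu (PySem.Int.floordiv t x) < pvMu t ∧ (2 ≤ x → 0 ≤ PySem.Int.floordiv t x) := by
  rcases hx with hx | hx
  · -- positive x: 0 ≤ q < t
    have ht1 : 0 < t := lt_of_le_of_ne (hpos hx) (Ne.symm ht)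
    rw [PySem.Int.floordiv_eq_ediv_of_pos (by omega)]
    have h0 : 0 ≤ t / x := Int.ediv_nonneg (by omega) (by omega)
    have h1 : t / x < t := by
      rw [Int.ediv_lt_iff_lt_mul (by omega)]
      nlinarith
    constructor
    · unfold pvMu; split_ifs <;> omega
    · intro _; exact h0
  · -- negative x
    have heq := PySem.Int.floordiv_mul_add_mod t x
    have hr := PySem.Int.mod_neg_bounds t (show x < 0 by omega)
    set q := PySem.Int.floordiv t x with hq
    set r := PySem.Int.mod t x with hrdef
    constructor
    · rcases lt_or_gt_of_ne ht with htneg | htpos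
      · -- t < 0: q ≥ 0 and 2q ≤ -t
        have hq0 : 0 ≤ q := by
          by_contra h
          push Not at h
          have : 0 ≤ x * (q + 1) := by
            nlinarith [mul_nonneg (show (0:Int) ≤ -x by omega) (show (0:Int) ≤ -(q+1) by omega)]
          nlinarith
        have h2q : 2 * q ≤ -t := by
          have : 2 * q ≤ (-x) * q := by nlinarith
          nlinarith
        unfold pvMu; split_ifs <;> omega
      · -- t > 0: q < 0 and 2(-q) ≤ t + 1
        have hq0 : q < 0 := by
          by_contra h
          push Not at h
          have : q * x ≤ 0 := by
            nlinarith [mul_nonneg h (show (0:Int) ≤ -x by omega)]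
          omega
        have h2q : 2 * (-q) ≤ t + 1 := by
          have h1 : (-x) * ((-q) - 1) < t := by nlinarith
          have h2 : 2 * ((-q) - 1) ≤ (-x) * ((-q) - 1) := by nlinarith
          omega
        unfold pvMu; split_ifs <;> omega
    · intro h2x; omega

-- the transpose lemma: A's remaining loop from state (pos, neg, p) equals
-- pos/neg combined with B's top-down (exact, overshoot) pair for the remaining digits
lemma pv_main (x : Int) (hx : 2 ≤ x ∨ x ≤ -2) :
    ∀ (fuel : Nat) (t : Int), pvMu t < fuel → (2 ≤ x → 0 ≤ t) →
    ∀ (pos neg p : Int), 1 ≤ p →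
    min (aGo x fuel t pos neg p).1 ((aGo x fuel t pos neg p).2.2 + (aGo x fuel t pos neg p).2.1)
      = min (pos + (bCost x (bDigits x fuel t) p).1) (neg + (bCost x (bDigits x fuel t) p).2) := by
  intro fuel
  induction fuel with
  | zero => intro t hmu; omega
  | succ f ih =>
    intro t hmu hgood pos neg p hp
    by_cases ht : t = 0
    · subst ht
      simp [aGo, bDigits, bCost]
      omega
    · have hstep := pvMu_step x t hx hgood ht
      rw [show aGo x (f+1) t pos neg p
          = aGo x f (PySem.Int.floordiv t x)
              (min (pos + PySem.Int.mod t x * p) (neg + (PySem.Int.mod t x + 1) * p))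
              (min (pos + (x - PySem.Int.mod t x) * p) (neg + (x - 1 - PySem.Int.mod t x) * p))
              (p + 1)
          from by rw [aGo]; simp [ht, show p > 0 from hp]]
      rw [show bDigits x (f+1) t = PySem.Int.mod t x :: bDigits x f (PySem.Int.floordiv t x)
          from by rw [bDigits]; simp [ht]]
      rw [ih (PySem.Int.floordiv t x) (by omega) hstep.2 _ _ (p+1) (by omega)]
      rw [bCost]
      simp only [show ¬ (p = 0) by omega, if_false]
      set r := PySem.Int.mod t x
      set eo := bCost x (bDigits x f (PySem.Int.floordiv t x)) (p+1)
      generalize r * p = A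
      generalize (r + 1) * p = B
      generalize (x - r) * p = C
      generalize (x - 1 - r) * p = D
      omega

-- ===== VERDICT (by name: the statement is the Claim_ definition above) =====
theorem leastOpsExpressTarget_spec : Claim_equal_leastOpsExpressTarget := by
  intro x target _hdom hpre
  unfold Spec_leastOpsExpressTarget
  by_cases ht : target = 0
  · subst ht
    simp [leastOpsExpressTarget, leastOpsExpressTarget_alt, aGo, bDigits, bCost]
  · have hx : 2 ≤ x ∨ x ≤ -2 := by
      rcases hpre with h | h | h <;> [omega; exact Or.inl h.1; exact Or.inr h]
    have hgood : 2 ≤ x → 0 ≤ target := by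
      rcases hpre with h | h | h <;> intro h2 <;> omega
    have hstep := pvMu_step x target hx hgood ht
    rw [leastOpsExpressTarget, leastOpsExpressTarget_alt]
    rw [show 2 * target.natAbs + 2 = (2 * target.natAbs + 1) + 1 from rfl]
    rw [show aGo x ((2 * target.natAbs + 1)+1) target 0 0 0
        = aGo x (2 * target.natAbs + 1) (PySem.Int.floordiv target x)
            (PySem.Int.mod target x * 2) ((x - PySem.Int.mod target x) * 2) 1
        from by rw [aGo]; simp [ht]]
    rw [show bDigits x ((2 * target.natAbs + 1)+1) target
        = PySem.Int.mod target x :: bDigits x (2 * target.natAbs + 1) (PySem.Int.floordiv target x)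
        from by rw [bDigits]; simp [ht]]
    have hmu : pvMu (PySem.Int.floordiv target x) < 2 * target.natAbs + 1 := by
      have := hstep.1; unfold pvMu at *; split_ifs at * <;> omega
    rw [pv_main x hx (2 * target.natAbs + 1) (PySem.Int.floordiv target x) hmu hstep.2
        (PySem.Int.mod target x * 2) ((x - PySem.Int.mod target x) * 2) 1 (by omega)]
    rw [bCost]
    simp
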